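-- pv_equiv track=rewrite | github.com/stevemccoy/aoc2024 | py/day17/day17.py | custom_035430
-- ===== SOURCE A (Python) =====
-- def custom_035430(arg_a):
-- 	exp_sequence = [0,3,5,4,3,0]
-- 	while True:
-- 		a = arg_a
-- 		b = c = 0
-- 		es = exp_sequence.copy()
-- 		r = True
-- 		while a != 0:
-- 			a = a // 8
-- 			e = es.pop(0)
-- 			if (a & 7) != e:
-- 				r = False
-- 				break
-- 			if len(es) == 0:
-- 				break
--
-- 		if r and a == 0:
-- 			if len(es) == 0:
-- 				break
--
-- 		arg_a += 1
--
-- 	return arg_a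
-- ===== SOURCE B (Python) =====
-- def custom_035430(arg_a):
--     # A value qualifies iff its octal digits above the lowest one are exactly
--     # 3,4,5,3,0 (read high to low), i.e. it lies in 0o345300 .. 0o345307.
--     lo = 0o345300  # 117440
--     if arg_a <= lo:
--         return lo
--     if arg_a <= lo + 7:
--         return arg_a
--     raise ValueError("no qualifying value >= arg_a")
-- ===== Notes on version B (the rewrite author's own statement) =====
-- stated objective: simpler
-- what changed: B replaces A's unbounded upward search, which re-simulates the octal-digit check for every candidate, with the closed-form qualifying interval 0o345300..0o345307; Pre_ excludes arg_a >= 117448, where A's search never terminates and B raises ValueError.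
-- outside the precondition, e.g. on custom_035430(117448): A does not finish within the time limit, B raises ValueError
import Mathlib
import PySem

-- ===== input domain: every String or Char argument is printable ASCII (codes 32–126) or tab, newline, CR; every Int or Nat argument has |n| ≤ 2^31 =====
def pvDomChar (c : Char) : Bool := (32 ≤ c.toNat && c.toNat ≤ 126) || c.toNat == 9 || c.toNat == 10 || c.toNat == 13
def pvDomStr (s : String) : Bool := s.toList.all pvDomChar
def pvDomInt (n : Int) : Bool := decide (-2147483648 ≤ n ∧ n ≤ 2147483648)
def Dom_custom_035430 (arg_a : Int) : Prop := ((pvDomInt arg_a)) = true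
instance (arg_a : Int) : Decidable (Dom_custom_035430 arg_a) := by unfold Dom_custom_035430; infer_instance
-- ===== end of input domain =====

-- B replaces A's unbounded upward search with the closed-form qualifying interval
-- 0o345300..0o345307 (= 117440..117447); proved equal on Pre_ (arg_a ≤ 117447),
-- outside which A never returns and B raises ValueError.


-- ===== PORT A =====
-- Inner `while a != 0` loop of A. State: (a, r, es); each iteration pops the head of es,
-- so the recursion is structural on es. Python's `a & 7` is ported as `PySem.Int.mod a 8`,
-- exact for every int since 8 is a power of two (a & 7 == a % 8 in Python).
-- The `[]` branch (pop from an empty list would raise) is unreachable in A's use: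
-- es starts nonempty and the loop breaks as soon as es becomes empty.
def pvInner_035430 (a : Int) (es : List Int) : Int × Bool × List Int :=
  if a = 0 then (a, true, es)
  else match es with
  | [] => (a, true, es)
  | e :: rest =>
    let a' := PySem.Int.floordiv a 8
    if PySem.Int.mod a' 8 ≠ e then (a', false, rest)
    else if rest = [] then (a', true, rest)
    else pvInner_035430 a' rest

-- Outer `while True` loop of A. The guard `117448 ≤ arg_a` only makes the recursion
-- total: Python's A never returns on those inputs (it searches upward forever), and
-- Pre_custom_035430 excludes them, so nothing is claimed there.
def pvOuter_035430 (arg_a : Int) : Int :=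
  if 117448 ≤ arg_a then arg_a
  else
    let res := pvInner_035430 arg_a [0, 3, 5, 4, 3, 0]
    -- Python: `if r and a == 0: if len(es) == 0: break`
    if res.2.1 = true ∧ res.1 = 0 ∧ res.2.2 = ([] : List Int) then arg_a
    else pvOuter_035430 (arg_a + 1)
termination_by (117448 - arg_a).toNat
decreasing_by omega

def custom_035430 (arg_a : Int) : Int := pvOuter_035430 arg_a

-- ===== PORT B =====
-- Source B: lo = 0o345300; if arg_a <= lo: return lo; if arg_a <= lo + 7: return arg_a;
-- raise ValueError.  The final branch returns 0 here only to make the port total: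
-- Source B raises there, and Pre_custom_035430 excludes those inputs.
def custom_035430_alt (arg_a : Int) : Int :=
  if arg_a ≤ 117440 then 117440
  else if arg_a ≤ 117440 + 7 then arg_a
  else 0

-- ===== PRECONDITION & SPEC =====
-- For arg_a ≥ 117448 (past the largest value whose octal digits above the lowest are 3,4,5,3,0)
-- A's upward search never finds a match and loops forever — A returns exactly on Pre_.
def Pre_custom_035430 (arg_a : Int) : Prop := arg_a ≤ 117447
instance (arg_a : Int) : Decidable (Pre_custom_035430 arg_a) := by unfold Pre_custom_035430; infer_instance
def pvWitness_custom_035430 : Int := (117440)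

def Spec_custom_035430 (arg_a : Int) (out : Int) : Prop := out = custom_035430_alt arg_a
instance (arg_a : Int) (out : Int) : Decidable (Spec_custom_035430 arg_a out) := by unfold Spec_custom_035430; infer_instance

-- ===== CLAIM (what is proved, stated in full; the proofs are below) =====
def Claim_equal_custom_035430 : Prop := ∀ (arg_a : Int), Dom_custom_035430 arg_a → Pre_custom_035430 arg_a → Spec_custom_035430 arg_a (custom_035430 arg_a)

-- ===== LEMMAS AND PROOFS =====
theorem pvInner_zero (es : List Int) : pvInner_035430 0 es = (0, true, es) := by
  rw [pvInner_035430.eq_def]; simp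

theorem pvInner_stop (a e : Int) (rest : List Int) (h0 : a ≠ 0)
    (hm : ¬ a / 8 % 8 = e) :
    pvInner_035430 a (e :: rest) = (a / 8, false, rest) := by
  rw [pvInner_035430.eq_def]; simp [h0, hm]

theorem pvInner_step (a e : Int) (r0 : Int) (rest : List Int) (h0 : a ≠ 0)
    (hm : a / 8 % 8 = e) :
    pvInner_035430 a (e :: r0 :: rest) = pvInner_035430 (a / 8) (r0 :: rest) := by
  rw [pvInner_035430.eq_def]; simp [h0, hm]

theorem pvInner_last (a e : Int) (h0 : a ≠ 0)
    (hm : a / 8 % 8 = e) :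
    pvInner_035430 a [e] = (a / 8, true, []) := by
  rw [pvInner_035430.eq_def]; simp [h0, hm]

-- The inner check succeeds exactly on the closed-form interval B uses.
theorem success_bounds (a : Int) (h : pvInner_035430 a [0, 3, 5, 4, 3, 0] = (0, true, [])) :
    117440 ≤ a ∧ a ≤ 117447 := by
  by_cases h0 : a = 0
  · rw [h0, pvInner_zero] at h; simp at h
  by_cases m1 : a / 8 % 8 = 0
  case neg => rw [pvInner_stop a 0 _ h0 m1] at h; simp at h
  rw [pvInner_step a 0 _ _ h0 m1] at h
  by_cases h1 : a / 8 = 0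
  · rw [h1, pvInner_zero] at h; simp at h
  by_cases m2 : a / 8 / 8 % 8 = 3
  case neg => rw [pvInner_stop _ 3 _ h1 m2] at h; simp at h
  rw [pvInner_step _ 3 _ _ h1 m2] at h
  by_cases h2 : a / 8 / 8 = 0
  · rw [h2, pvInner_zero] at h; simp at h
  by_cases m3 : a / 8 / 8 / 8 % 8 = 5
  case neg => rw [pvInner_stop _ 5 _ h2 m3] at h; simp at h
  rw [pvInner_step _ 5 _ _ h2 m3] at h
  by_cases h3 : a / 8 / 8 / 8 = 0
  · rw [h3, pvInner_zero] at h; simp at h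
  by_cases m4 : a / 8 / 8 / 8 / 8 % 8 = 4
  case neg => rw [pvInner_stop _ 4 _ h3 m4] at h; simp at h
  rw [pvInner_step _ 4 _ _ h3 m4] at h
  by_cases h4 : a / 8 / 8 / 8 / 8 = 0
  · rw [h4, pvInner_zero] at h; simp at h
  by_cases m5 : a / 8 / 8 / 8 / 8 / 8 % 8 = 3
  case neg => rw [pvInner_stop _ 3 _ h4 m5] at h; simp at h
  rw [pvInner_step _ 3 _ _ h4 m5] at h
  by_cases h5 : a / 8 / 8 / 8 / 8 / 8 = 0
  · rw [h5, pvInner_zero] at h; simp at h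
  by_cases m6 : a / 8 / 8 / 8 / 8 / 8 / 8 % 8 = 0
  case neg => rw [pvInner_stop _ 0 _ h5 m6] at h; simp at h
  rw [pvInner_last _ 0 h5 m6] at h
  have h6 : a / 8 / 8 / 8 / 8 / 8 / 8 = 0 := by simpa using congrArg Prod.fst h
  omega

theorem bounds_success (a : Int) (h1 : 117440 ≤ a) (h2 : a ≤ 117447) :
    pvInner_035430 a [0, 3, 5, 4, 3, 0] = (0, true, []) := by
  interval_cases a <;> decide

theorem inner_cond_iff (a : Int) :
    ((pvInner_035430 a [0, 3, 5, 4, 3, 0]).2.1 = true ∧ (pvInner_035430 a [0, 3, 5, 4, 3, 0]).1 = 0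
      ∧ (pvInner_035430 a [0, 3, 5, 4, 3, 0]).2.2 = ([] : List Int)) ↔ (117440 ≤ a ∧ a ≤ 117447) := by
  constructor
  · intro ⟨hr, ha, hes⟩
    refine success_bounds a ?_
    rw [Prod.ext_iff, Prod.ext_iff]
    exact ⟨ha, hr, hes⟩
  · intro ⟨h1, h2⟩
    rw [bounds_success a h1 h2]
    exact ⟨rfl, rfl, rfl⟩

theorem outer_hit (a : Int) (h1 : 117440 ≤ a) (h2 : a ≤ 117447) : pvOuter_035430 a = a := by
  rw [pvOuter_035430]
  rw [if_neg (by omega)]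
  simp only [if_pos ((inner_cond_iff a).mpr ⟨h1, h2⟩)]

theorem outer_below (n : Nat) : ∀ (a : Int), (117440 - a).toNat ≤ n → a < 117440 →
    pvOuter_035430 a = 117440 := by
  induction n with
  | zero => intro a hn ha; omega
  | succ n ih =>
    intro a hn ha
    rw [pvOuter_035430]
    rw [if_neg (by omega)]
    rw [if_neg (by rw [inner_cond_iff]; omega)]
    by_cases he : a + 1 = 117440
    · rw [he]; exact outer_hit 117440 (by omega) (by omega)
    · exact ih (a + 1) (by omega) (by omega)

-- ===== VERDICT (by name: the statement is the Claim_ definition above) =====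
theorem custom_035430_spec : Claim_equal_custom_035430 := by
  intro a _ hpre
  unfold Pre_custom_035430 at hpre
  unfold Spec_custom_035430 custom_035430 custom_035430_alt
  by_cases hlo : a ≤ 117440
  · rw [if_pos hlo]
    rcases eq_or_lt_of_le hlo with he | hlt
    · rw [he]; exact outer_hit 117440 (by omega) (by omega)
    · exact outer_below (117440 - a).toNat a (le_refl _) hlt
  · rw [if_neg hlo, if_pos (by omega)]
    exact outer_hit a (by omega) (by omega)
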